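-- pv_equiv track=rewrite | github.com/ArsPro13/Project_One-actionService | pixelize.py | av_arifm
-- ===== SOURCE A (Python) =====
-- def av_arifm(colors):
--     sm0 = 0
--     sm1 = 0
--     sm2 = 0
--     for x in colors:
--         sm0 += x[0]
--         sm1 += x[1]
--         sm2 += x[2]
--     return (sm0 // len(colors), sm1 // len(colors), sm2 // len(colors))
-- ===== SOURCE B (Python) =====
-- def av_arifm(colors):
--     n = len(colors)
--     return tuple(sum(c[i] for c in colors) // n for i in range(3))
-- ===== Notes on version B (the rewrite author's own statement) =====
-- stated objective: simpler
-- what changed: Replaces the single-pass three-accumulator loop with three per-channel passes: one sum() comprehension per channel, divided by the length computed once.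
import Mathlib
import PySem

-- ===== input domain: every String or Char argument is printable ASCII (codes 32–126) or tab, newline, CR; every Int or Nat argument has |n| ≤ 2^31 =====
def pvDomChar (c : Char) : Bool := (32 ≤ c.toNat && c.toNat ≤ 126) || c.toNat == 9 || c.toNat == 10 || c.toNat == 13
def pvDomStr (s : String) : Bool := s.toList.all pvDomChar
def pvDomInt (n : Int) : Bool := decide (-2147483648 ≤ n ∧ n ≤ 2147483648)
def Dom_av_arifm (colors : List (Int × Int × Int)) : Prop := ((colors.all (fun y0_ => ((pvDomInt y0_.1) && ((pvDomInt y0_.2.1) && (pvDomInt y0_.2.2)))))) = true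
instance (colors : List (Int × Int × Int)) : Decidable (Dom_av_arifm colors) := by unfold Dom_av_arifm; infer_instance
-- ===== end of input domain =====

-- B replaces A's single-pass triple-accumulator loop with three per-channel sum passes (objective: simpler).
-- ===== PORT A =====
def av_arifm (colors : List (Int × Int × Int)) : Int × Int × Int :=
  let st := colors.foldl (fun (s : Int × Int × Int) x => (s.1 + x.1, s.2.1 + x.2.1, s.2.2 + x.2.2)) (0, 0, 0)
  (PySem.Int.floordiv st.1 colors.length,
   PySem.Int.floordiv st.2.1 colors.length,
   PySem.Int.floordiv st.2.2 colors.length)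

-- ===== PORT B =====
def av_arifm_alt (colors : List (Int × Int × Int)) : Int × Int × Int :=
  let n : Int := colors.length
  (PySem.Int.floordiv ((colors.map (fun c => c.1)).sum) n,
   PySem.Int.floordiv ((colors.map (fun c => c.2.1)).sum) n,
   PySem.Int.floordiv ((colors.map (fun c => c.2.2)).sum) n)

-- ===== PRECONDITION & SPEC =====
-- Pre_ excludes the empty list, on which both A and B raise ZeroDivisionError.
def Pre_av_arifm (colors : List (Int × Int × Int)) : Prop := colors ≠ []
instance (colors : List (Int × Int × Int)) : Decidable (Pre_av_arifm colors) := by unfold Pre_av_arifm; infer_instance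
def pvWitness_av_arifm : (List (Int × Int × Int)) := [(1, 2, 3)]

def Spec_av_arifm (colors : List (Int × Int × Int)) (out : Int × Int × Int) : Prop := out = av_arifm_alt colors
instance (colors : List (Int × Int × Int)) (out : Int × Int × Int) : Decidable (Spec_av_arifm colors out) := by unfold Spec_av_arifm; infer_instance

-- ===== CLAIM (what is proved, stated in full; the proofs are below) =====
def Claim_equal_av_arifm : Prop := ∀ (colors : List (Int × Int × Int)), Dom_av_arifm colors → Pre_av_arifm colors → Spec_av_arifm colors (av_arifm colors)

-- ===== LEMMAS AND PROOFS =====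
theorem foldl_triple_eq_sums (colors : List (Int × Int × Int)) (a b c : Int) :
    colors.foldl (fun (s : Int × Int × Int) x => (s.1 + x.1, s.2.1 + x.2.1, s.2.2 + x.2.2)) (a, b, c)
      = (a + (colors.map (fun x => x.1)).sum,
         b + (colors.map (fun x => x.2.1)).sum,
         c + (colors.map (fun x => x.2.2)).sum) := by
  induction colors generalizing a b c with
  | nil => simp
  | cons h t ih => simp [List.foldl_cons, ih]; omega

-- ===== VERDICT (by name: the statement is the Claim_ definition above) =====
theorem av_arifm_spec : Claim_equal_av_arifm := by
  intro colors _ _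
  unfold Spec_av_arifm av_arifm av_arifm_alt
  simp [foldl_triple_eq_sums]
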